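-- pv_equiv track=rewrite | github.com/shogo314/icpc_standings | parse_dom.py | depth_analysis
-- ===== SOURCE A (Python) =====
-- def depth_analysis(l: list[str]) -> list[tuple[int, str]]:
--     ret: list[tuple[int, str]] = []
--     k = 0
--     for s in l:
--         if s.startswith("</tr"):
--             k -= 1
--         elif s.startswith("<tr"):
--             ret.append((k, s))
--             k += 1
--         else:
--             ret.append((k, s))
--     return ret
-- ===== SOURCE B (Python) =====
-- def depth_analysis(l: list[str]) -> list[tuple[int, str]]:
--     deltas = [-1 if s.startswith("</tr") else (1 if s.startswith("<tr") else 0) for s in l]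
--     depths = [0]
--     for d in deltas:
--         depths.append(depths[-1] + d)
--     return [(d, s) for d, s in zip(depths, l) if not s.startswith("</tr")]
-- ===== Notes on version B (the rewrite author's own statement) =====
-- stated objective: alternative
-- what changed: Replaced the single stateful loop (running counter with conditional appends) by a three-pass prefix-sum decomposition: a per-line delta list, an exclusive prefix-depth table, and a filtered zip comprehension producing the output.
import Mathlib
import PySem

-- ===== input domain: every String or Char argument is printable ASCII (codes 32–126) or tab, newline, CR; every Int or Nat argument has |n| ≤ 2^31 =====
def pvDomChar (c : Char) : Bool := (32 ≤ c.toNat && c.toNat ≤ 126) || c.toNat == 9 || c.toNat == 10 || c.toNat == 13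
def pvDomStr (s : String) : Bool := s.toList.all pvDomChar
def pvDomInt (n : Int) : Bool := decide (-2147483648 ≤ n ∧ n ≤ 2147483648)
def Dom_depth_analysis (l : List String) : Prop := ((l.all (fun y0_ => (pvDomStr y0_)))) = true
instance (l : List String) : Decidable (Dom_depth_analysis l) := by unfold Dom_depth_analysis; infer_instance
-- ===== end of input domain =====

-- B rewrites A's stateful counter loop as delta list + prefix-depth table + filtered zip; same O(n) cost, different decomposition.

-- ===== PORT A =====
-- the for-loop of A, carrying ret and k
def pvLoopA (ret : List (Int × String)) (k : Int) : List String → List (Int × String)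
  | [] => ret
  | s :: rest =>
    if PySem.Str.startswith s "</tr" then pvLoopA ret (k - 1) rest
    else if PySem.Str.startswith s "<tr" then pvLoopA (ret ++ [(k, s)]) (k + 1) rest
    else pvLoopA (ret ++ [(k, s)]) k rest

def depth_analysis (l : List String) : List (Int × String) := pvLoopA [] 0 l

-- ===== PORT B =====
def pvDelta (s : String) : Int :=
  if PySem.Str.startswith s "</tr" then -1 else if PySem.Str.startswith s "<tr" then 1 else 0

-- the for-loop of B: appends depths[-1] + d for each delta (carrying depths[-1] as k)
def pvBuildDepths (k : Int) : List Int → List Int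
  | [] => []
  | d :: ds => (k + d) :: pvBuildDepths (k + d) ds

def depth_analysis_alt (l : List String) : List (Int × String) :=
  let deltas := l.map pvDelta
  let depths := 0 :: pvBuildDepths 0 deltas
  (depths.zip l).filterMap fun p =>
    if PySem.Str.startswith p.2 "</tr" then none else some (p.1, p.2)

-- ===== PRECONDITION & SPEC =====
def Spec_depth_analysis (l : List String) (out : List (Int × String)) : Prop := out = depth_analysis_alt l
instance (l : List String) (out : List (Int × String)) : Decidable (Spec_depth_analysis l out) := by unfold Spec_depth_analysis; infer_instance

-- ===== CLAIM (what is proved, stated in full; the proofs are below) =====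
def Claim_equal_depth_analysis : Prop := ∀ (l : List String), Dom_depth_analysis l → Spec_depth_analysis l (depth_analysis l)

-- ===== LEMMAS AND PROOFS =====

theorem pvLoopA_append (ret : List (Int × String)) (k : Int) (l : List String) :
    pvLoopA ret k l = ret ++ pvLoopA [] k l := by
  induction l generalizing ret k with
  | nil => simp [pvLoopA]
  | cons s rest ih =>
    simp only [pvLoopA]
    split_ifs with h1 h2
    · exact ih ret (k - 1)
    · rw [ih (ret ++ [(k, s)]) (k + 1), show ([]:List (Int × String)) ++ [(k,s)] = [(k,s)] from rfl, ih [(k, s)] (k + 1)]; simp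
    · rw [ih (ret ++ [(k, s)]) k, show ([]:List (Int × String)) ++ [(k,s)] = [(k,s)] from rfl, ih [(k, s)] k]; simp

-- B's core, with the prefix table started from an arbitrary current depth k
def pvCoreB (k : Int) (l : List String) : List (Int × String) :=
  ((k :: pvBuildDepths k (l.map pvDelta)).zip l).filterMap fun p =>
    if PySem.Str.startswith p.2 "</tr" then none else some (p.1, p.2)

theorem pvLoopA_eq_core (l : List String) (k : Int) : pvLoopA [] k l = pvCoreB k l := by
  induction l generalizing k with
  | nil => simp [pvLoopA, pvCoreB]
  | cons s rest ih =>
    simp only [pvLoopA, pvCoreB, List.map, pvBuildDepths, List.zip, List.zipWith,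
      List.filterMap, pvDelta]
    split_ifs with h1 h2
    · simpa [pvCoreB] using ih (k - 1)
    · rw [pvLoopA_append]
      simpa [pvCoreB] using congrArg (List.cons (k, s)) (ih (k + 1))
    · rw [pvLoopA_append]
      simpa [pvCoreB] using congrArg (List.cons (k, s)) (ih k)

-- ===== VERDICT (by name: the statement is the Claim_ definition above) =====
theorem depth_analysis_spec : Claim_equal_depth_analysis := by
  intro l _
  show depth_analysis l = depth_analysis_alt l
  simpa [depth_analysis, depth_analysis_alt, pvCoreB] using pvLoopA_eq_core l 0
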